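-- pv_equiv track=rewrite | github.com/luis-canas/Pairs-Trading | modules/trading_phase.py | __force_close
-- ===== SOURCE A (Python) =====
-- CLOSE_INACTIVITY = 252
--
-- LONG_SPREAD = 1
--
-- SHORT_SPREAD = -1
--
-- CLOSE_POSITION = 0
--
-- def __force_close(decision_array):
--
--     count = 0
--     for day in range(1, len(decision_array)):  # Iterate trade_array
--
--         if count >= CLOSE_INACTIVITY:  # Count reached non convergence threshold
--             day_aux = day
--
--             # Close all position until new decision is found in trade_array
--             while decision_array[day_aux] == decision_array[day - 1]:
--                 decision_array[day_aux] = CLOSE_POSITION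
--                 day_aux += 1  # next day
--
--                 if day_aux == len(decision_array):  # end of trade array
--                     break
--         if decision_array[day] == decision_array[day-1]:  # same decision is found
--
--             # Long/short decision, continue count
--             if decision_array[day] == LONG_SPREAD or decision_array[day] == SHORT_SPREAD:
--                 count += 1
--
--         else:  # reset counter
--             count = 0
--
--     return decision_array
-- ===== SOURCE B (Python) =====
-- CLOSE_INACTIVITY = 252
--
-- LONG_SPREAD = 1
--
-- SHORT_SPREAD = -1
--
-- CLOSE_POSITION = 0
--
-- def __force_close(decision_array):
--     # Two-phase run-based rewrite: split into maximal runs of equal values; for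
--     # a long/short run longer than CLOSE_INACTIVITY+1 keep the first
--     # CLOSE_INACTIVITY+1 entries and close (zero) the rest.  Mutates the list
--     # in place like the original and returns it.
--     keep = CLOSE_INACTIVITY + 1
--     result = []
--     i = 0
--     n = len(decision_array)
--     while i < n:
--         v = decision_array[i]
--         j = i
--         while j < n and decision_array[j] == v:
--             j += 1
--         length = j - i
--         if (v == LONG_SPREAD or v == SHORT_SPREAD) and length > keep:
--             result += [v] * keep + [CLOSE_POSITION] * (length - keep)
--         else:
--             result += [v] * length
--         i = j
--     decision_array[:] = result
--     return decision_array
-- ===== Notes on version B (the rewrite author's own statement) =====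
-- stated objective: simpler
-- what changed: Replaced A's interleaved single-scan with a counter and an inner zeroing while-loop by a two-phase pass: segment the array into maximal runs of equal values, then for each long/short run longer than CLOSE_INACTIVITY+1 keep the first CLOSE_INACTIVITY+1 entries and zero the rest.
import Mathlib
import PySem

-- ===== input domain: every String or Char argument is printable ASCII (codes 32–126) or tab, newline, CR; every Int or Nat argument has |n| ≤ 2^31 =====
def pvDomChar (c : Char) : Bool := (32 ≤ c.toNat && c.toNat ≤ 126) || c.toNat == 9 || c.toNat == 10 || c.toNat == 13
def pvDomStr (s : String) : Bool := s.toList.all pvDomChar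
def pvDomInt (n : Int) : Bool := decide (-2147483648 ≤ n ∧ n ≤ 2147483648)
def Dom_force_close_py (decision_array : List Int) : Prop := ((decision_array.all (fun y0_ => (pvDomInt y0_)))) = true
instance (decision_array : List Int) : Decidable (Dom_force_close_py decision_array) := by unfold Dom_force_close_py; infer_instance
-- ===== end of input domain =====

-- B rewrites A's interleaved index-scan-with-inner-while as a two-phase pass over maximal
-- runs (objective: simpler decomposition, same cost).  Both Pythons mutate the list in
-- place; the theorems here are about the returned value (which equals the final list).

-- ===== PORT A =====
-- A mutates decision_array in place, scanning day = 1 .. len-1; writes only happen at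
-- positions ≥ day, so the prefix up to day-1 is final.  The port therefore emits the
-- finalized element each step and recurses over the untouched suffix, carrying
-- prev = decision_array[day-1] (after any writes) and count, exactly A's state.
-- Inner while loop: zero the leading elements equal to prev (the first test is fused
-- with `count ≥ 252 ∧ d = prev`, exactly Python's first iteration of the while).
def zeroWhile (prev : Int) : List Int → List Int
  | [] => []
  | x :: xs => if x = prev then 0 :: zeroWhile prev xs else x :: xs

theorem zeroWhile_length (prev : Int) (l : List Int) : (zeroWhile prev l).length = l.length := by
  induction l with
  | nil => rfl
  | cons x xs ih => simp only [zeroWhile]; split <;> simp [ih]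

def aForce (prev : Int) (rest : List Int) (count : Int) : List Int :=
  match rest with
  | [] => []
  | d :: ds =>
    -- if count >= CLOSE_INACTIVITY: run the inner while (zeroing the run equal to prev)
    let p : Int × List Int := if count ≥ 252 ∧ d = prev then (0, zeroWhile prev ds) else (d, ds)
    -- re-read decision_array[day] (= p.1) and compare with decision_array[day-1] (= prev)
    p.1 :: aForce p.1 p.2 (if p.1 = prev then (if p.1 = 1 ∨ p.1 = -1 then count + 1 else count) else 0)
termination_by rest.length
decreasing_by
  simp only [List.length_cons]
  split <;> simp [zeroWhile_length]

def force_close_py (decision_array : List Int) : List Int :=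
  match decision_array with
  | [] => decision_array
  | x :: xs => x :: aForce x xs 0

-- ===== PORT B =====
-- Source B: outer while over run starts; inner while finds the run's end; emit the run,
-- truncated to 253 kept entries plus zeros when it is a long/short run longer than 253.
def bRuns : List Int → List Int
  | [] => []
  | x :: xs =>
    let run := xs.takeWhile (· == x)
    let rest := xs.dropWhile (· == x)
    let length := run.length + 1
    (if (x = 1 ∨ x = -1) ∧ length > 253 then
        List.replicate 253 x ++ List.replicate (length - 253) 0
      else List.replicate length x) ++ bRuns rest
termination_by l => l.length
decreasing_by
  have := List.length_dropWhile_le (fun y => y == x) xs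
  simpa using Nat.lt_succ_of_le this

def force_close_py_alt (decision_array : List Int) : List Int := bRuns decision_array

-- ===== PRECONDITION & SPEC =====
def Spec_force_close_py (decision_array : List Int) (out : List Int) : Prop := out = force_close_py_alt decision_array
instance (decision_array : List Int) (out : List Int) : Decidable (Spec_force_close_py decision_array out) := by unfold Spec_force_close_py; infer_instance

-- ===== CLAIM (what is proved, stated in full; the proofs are below) =====
def Claim_equal_force_close_py : Prop := ∀ (decision_array : List Int), Dom_force_close_py decision_array → Spec_force_close_py decision_array (force_close_py decision_array)

-- ===== LEMMAS AND PROOFS =====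

-- Proof-side characterisation of A's loop from an arbitrary reachable state (prev = v,
-- count = c): emit the leading run of v, truncating it when it overruns the threshold.
def bAux (v c : Int) (xs : List Int) : List Int :=
  let m := (xs.takeWhile (· == v)).length
  let rest := xs.dropWhile (· == v)
  if (v = 1 ∨ v = -1) ∧ (252 - c).toNat < m then
    List.replicate (252 - c).toNat v ++ List.replicate (m - (252 - c).toNat) 0 ++ bRuns rest
  else List.replicate m v ++ bRuns rest

theorem zeroWhile_eq (v : Int) (l : List Int) :
    zeroWhile v l = List.replicate (l.takeWhile (· == v)).length 0 ++ l.dropWhile (· == v) := by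
  induction l with
  | nil => rfl
  | cons x xs ih =>
    simp only [zeroWhile, List.takeWhile_cons, List.dropWhile_cons]
    by_cases h : x = v
    · simp [h, ih, List.replicate_succ]
    · simp [h, beq_iff_eq]

theorem bRuns_cons (d : Int) (ds : List Int) :
    bRuns (d :: ds) = d :: bAux d 0 ds := by
  rw [bRuns, bAux]
  have h252 : ((252:Int) - 0).toNat = 252 := by decide
  rw [h252]
  by_cases h1 : (d = 1 ∨ d = -1)
  · by_cases h2 : 252 < (ds.takeWhile (· == d)).length
    · rw [if_pos ⟨h1, by omega⟩, if_pos ⟨h1, h2⟩]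
      have hz : (ds.takeWhile (· == d)).length + 1 - 253
          = (ds.takeWhile (· == d)).length - 252 := by omega
      rw [hz, show (List.replicate 253 d : List Int) = d :: List.replicate 252 d from rfl]
      simp only [List.cons_append, List.append_assoc]
    · rw [if_neg (by rintro ⟨-, h⟩; omega), if_neg (by rintro ⟨-, h⟩; omega)]
      simp [List.replicate_succ]
  · rw [if_neg (by rintro ⟨h, -⟩; exact h1 h), if_neg (by rintro ⟨h, -⟩; exact h1 h)]
    simp [List.replicate_succ]

theorem takeWhile_replicate_append (m : Nat) (rest : List Int) :
    ((List.replicate m (0:Int) ++ rest).takeWhile (· == 0)).length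
      = m + (rest.takeWhile (· == 0)).length ∧
    (List.replicate m (0:Int) ++ rest).dropWhile (· == 0) = rest.dropWhile (· == 0) := by
  induction m with
  | zero => simp
  | succ k ih =>
    obtain ⟨h1, h2⟩ := ih
    refine ⟨?_, ?_⟩
    · simp only [List.replicate_succ, List.cons_append, List.takeWhile_cons, beq_self_eq_true,
        if_pos, List.length_cons, h1]
      omega
    · simpa [List.replicate_succ, List.dropWhile_cons] using h2

-- The zeroed tail merges with any following run of zeros.
theorem bAux_zero (m : Nat) (rest : List Int) :
    bAux 0 0 (List.replicate m 0 ++ rest) = List.replicate m 0 ++ bRuns rest := by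
  rw [bAux]
  obtain ⟨ht, hd⟩ := takeWhile_replicate_append m rest
  simp only at ht hd ⊢
  rw [if_neg (by rintro ⟨h, -⟩; simp at h), ht, hd]
  cases rest with
  | nil => simp
  | cons h t =>
    by_cases h0 : h = 0
    · subst h0
      rw [bRuns, if_neg (by rintro ⟨h, -⟩; simp at h)]
      simp only [List.takeWhile_cons, List.dropWhile_cons, beq_self_eq_true, if_pos,
        List.length_cons]
      rw [List.replicate_add]
      simp [List.replicate_succ, List.append_assoc]
    · simp [h0, beq_iff_eq]

-- One-step unfoldings of A's loop.
theorem aForce_step_ne (v c d : Int) (ds : List Int) (hd : d ≠ v) :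
    aForce v (d :: ds) c = d :: aForce d ds 0 := by
  rw [aForce]; simp [hd]

theorem aForce_step_eq_lt (v c : Int) (ds : List Int) (h : ¬ c ≥ 252) :
    aForce v (v :: ds) c = v :: aForce v ds (if v = 1 ∨ v = -1 then c + 1 else c) := by
  rw [aForce]; simp [h]

theorem aForce_step_eq_ge (v c : Int) (ds : List Int) (h : c ≥ 252) (hv : (0:Int) ≠ v) :
    aForce v (v :: ds) c = 0 :: aForce 0 (zeroWhile v ds) 0 := by
  rw [aForce]; simp [h, hv]

-- Main invariant: from any reachable state, A's loop emits bAux.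
theorem aForce_eq_bAux : ∀ n (xs : List Int), xs.length ≤ n → ∀ (v c : Int),
    0 ≤ c → c ≤ 252 → (v = 1 ∨ v = -1 ∨ c = 0) → aForce v xs c = bAux v c xs := by
  intro n
  induction n with
  | zero =>
    intro xs hl v c _ _ _
    have h : xs = [] := List.eq_nil_of_length_eq_zero (Nat.le_zero.mp hl)
    subst h
    simp [aForce, bAux, bRuns]
  | succ k ih =>
    intro xs hl v c hc0 hc252 hside
    cases xs with
    | nil => simp [aForce, bAux, bRuns]
    | cons d ds =>
      simp only [List.length_cons] at hl
      by_cases hdv : d = v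
      · subst hdv
        have hTW : (d :: ds).takeWhile (· == d) = d :: ds.takeWhile (· == d) :=
          List.takeWhile_cons_of_pos (by simp)
        have hDW : (d :: ds).dropWhile (· == d) = ds.dropWhile (· == d) :=
          List.dropWhile_cons_of_pos (by simp)
        by_cases htrig : c ≥ 252
        · -- count reached the threshold: the inner while zeroes the leading run of d
          have hc : c = 252 := le_antisymm hc252 htrig
          subst hc
          have hv : d = 1 ∨ d = -1 := by rcases hside with h | h | h <;> simp_all
          have hd0 : (0:Int) ≠ d := by rcases hv with h | h <;> simp [h]
          rw [aForce_step_eq_ge d 252 ds htrig hd0, zeroWhile_eq]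
          rw [ih _ (by have h3 := congrArg List.length
                         (List.takeWhile_append_dropWhile (p := (· == d)) (l := ds))
                       simp only [List.length_append, List.length_replicate] at h3 ⊢
                       omega)
              0 0 le_rfl (by norm_num) (by right; right; rfl)]
          rw [bAux_zero, bAux]
          simp only [hTW, hDW, List.length_cons]
          rw [if_pos ⟨hv, by omega⟩, show ((252:Int) - 252).toNat = 0 from by decide]
          simp [List.replicate_succ]
        · -- count below the threshold: continue the run
          rw [aForce_step_eq_lt d c ds htrig]
          by_cases hv : d = 1 ∨ d = -1
          · rw [if_pos hv]
            rw [ih ds (by omega) d (c + 1) (by omega) (by omega) (by tauto)]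
            rw [bAux, bAux]
            simp only [hTW, hDW, List.length_cons]
            have hlt : c < 252 := lt_of_not_ge htrig
            have harith : ((252:Int) - c).toNat = ((252:Int) - (c + 1)).toNat + 1 := by omega
            by_cases h2 : ((252:Int) - (c + 1)).toNat < (ds.takeWhile (· == d)).length
            · rw [if_pos ⟨hv, h2⟩, if_pos ⟨hv, by omega⟩, harith]
              have hz : (ds.takeWhile (· == d)).length + 1 - (((252:Int) - (c + 1)).toNat + 1)
                  = (ds.takeWhile (· == d)).length - ((252:Int) - (c + 1)).toNat := by omega
              rw [hz]
              simp [List.replicate_succ, List.append_assoc]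
            · rw [if_neg (by rintro ⟨-, h⟩; omega), if_neg (by rintro ⟨-, h⟩; omega)]
              simp [List.replicate_succ]
          · rw [if_neg hv]
            have hc0' : c = 0 := by tauto
            subst hc0'
            rw [ih ds (by omega) d 0 le_rfl (by norm_num) (by tauto)]
            rw [bAux, bAux]
            simp only [hTW, hDW, List.length_cons]
            rw [if_neg (by rintro ⟨h, -⟩; exact hv h), if_neg (by rintro ⟨h, -⟩; exact hv h)]
            simp [List.replicate_succ]
      · -- transition: the counter resets (an entered inner while zeroes nothing)
        rw [aForce_step_ne v c d ds hdv]
        rw [ih ds (by omega) d 0 le_rfl (by norm_num) (by tauto), ← bRuns_cons, bAux]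
        rw [List.takeWhile_cons_of_neg (by simp [hdv]), List.dropWhile_cons_of_neg (by simp [hdv])]
        simp

-- ===== VERDICT (by name: the statement is the Claim_ definition above) =====
theorem force_close_py_spec : Claim_equal_force_close_py := by
  intro arr _
  unfold Spec_force_close_py
  cases arr with
  | nil => simp [force_close_py, force_close_py_alt, bRuns]
  | cons x xs =>
    show force_close_py (x :: xs) = force_close_py_alt (x :: xs)
    rw [show force_close_py (x :: xs) = x :: aForce x xs 0 from rfl]
    unfold force_close_py_alt
    rw [aForce_eq_bAux xs.length xs le_rfl x 0 le_rfl (by norm_num) (by tauto), bRuns_cons]
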